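-- pv_equiv track=rewrite | github.com/JunheePark0-0/Grad_School | RAG_LAW/py_files/parsing_chunking.py | pack_sentences
-- ===== SOURCE A (Python) =====
-- def pack_sentences(merged, max_len):
--     """문장 단위로 분할된 문장 리스트를 길이에 맞게 패킹"""
--     packs = []
--     pack = []
--     pack_len = 0
--
--     for sent in merged:
--         sent = sent.strip()
--         sent_len = len(sent) + (1 if pack else 0)
--
--         if pack_len + sent_len <= max_len:
--             pack.append(sent)
--             pack_len += sent_len
--         else:
--             if pack:
--                 packs.append(" ".join(pack))
--             if len(sent) <= max_len:
--                 pack = [sent]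
--                 pack_len = len(sent)
--             else:
--                 while len(sent) > max_len:
--                     packs.append(sent[:max_len])
--                     sent = sent[max_len:]
--                 if sent:
--                     pack = [sent]
--                     pack_len = len(sent)
--                 else:
--                     pack = []
--                     pack_len = 0
--     if pack:
--         packs.append(" ".join(pack))
--
--     return packs
-- ===== SOURCE B (Python) =====
-- def pack_sentences(merged, max_len):
--     """문장 단위로 분할된 문장 리스트를 길이에 맞게 패킹"""
--     # Phase 1: normalize every stripped sentence into fitting pieces
--     # (oversize ones become their stride-max_len slices).
--     pieces = []
--     for raw in merged:
--         s = raw.strip()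
--         if len(s) <= max_len:
--             pieces.append(s)
--         else:
--             pieces.extend(s[i:i + max_len] for i in range(0, len(s), max_len))
--     # Phase 2: greedy pack, growing the current chunk as a string.
--     packs = []
--     cur = None
--     for p in pieces:
--         cand = p if cur is None else cur + " " + p
--         if len(cand) <= max_len:
--             cur = cand
--         else:
--             if cur is not None:
--                 packs.append(cur)
--             cur = p
--     if cur is not None:
--         packs.append(cur)
--     return packs
-- ===== Notes on version B (the rewrite author's own statement) =====
-- stated objective: alternative
-- what changed: A's single stateful loop (strip, pack into a list with a running length counter, split oversize sentences inline with a while loop) is decomposed into two phases: first normalize each stripped sentence into fitting pieces by stride-max_len range slicing, then greedily pack by growing the current chunk as a single Optional string instead of a list plus length counter.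
import Mathlib
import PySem

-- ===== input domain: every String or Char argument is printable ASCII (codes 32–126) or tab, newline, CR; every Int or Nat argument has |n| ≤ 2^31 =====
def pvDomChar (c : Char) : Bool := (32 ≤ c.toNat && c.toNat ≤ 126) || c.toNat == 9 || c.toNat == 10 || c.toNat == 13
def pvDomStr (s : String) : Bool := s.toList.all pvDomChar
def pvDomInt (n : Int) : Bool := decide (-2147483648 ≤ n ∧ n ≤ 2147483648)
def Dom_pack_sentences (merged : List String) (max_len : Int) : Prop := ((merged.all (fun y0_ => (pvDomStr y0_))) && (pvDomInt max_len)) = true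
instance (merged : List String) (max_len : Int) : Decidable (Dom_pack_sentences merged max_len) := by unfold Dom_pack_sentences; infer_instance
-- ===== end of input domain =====

-- B replaces A's single stateful loop (strip/pack/split inline, state = packs + open pack list +
-- running length) by two phases: normalize each stripped sentence into fitting pieces by
-- stride-max_len range slicing, then greedily grow the current chunk as one string (Option):
-- same return value wherever A terminates ('alternative' decomposition, no speed claim).

-- ===== PORT A =====
-- A's inner 'while len(sent) > max_len: packs.append(sent[:max_len]); sent = sent[max_len:]'.
-- The '0 < m' conjunct is a totality guard only: Python loops forever there (outside Pre_).
def pvAWhile (packs : List String) (sent : String) (m : Int) : List String × String :=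
  if h : m < PySem.Str.len sent ∧ 0 < m then
    pvAWhile (packs ++ [PySem.Str.slice sent none (some m)]) (PySem.Str.slice sent (some m) none) m
  else (packs, sent)
termination_by (PySem.Str.len sent).toNat
decreasing_by
  have h1 : (PySem.Str.slice sent (some m) none).toList = sent.toList.drop m.toNat := by
    rw [PySem.Str.toList_slice, PySem.Chars.slice_eq_listSlice,
        PySem.List.slice_from _ (le_of_lt h.2)]
  have h2 := h.1
  have h3 := h.2
  rw [PySem.Str.len_eq] at h2
  have h4 : PySem.Str.len (PySem.Str.slice sent (some m) none)
      = ((sent.toList.length - m.toNat : Nat) : Int) := by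
    rw [PySem.Str.len_eq, h1]; simp
  rw [h4, PySem.Str.len_eq]
  omega

-- one iteration of A's 'for sent in merged' body, on state (packs, pack, pack_len)
def pvAStep (m : Int) (st : List String × List String × Int) (sent0 : String) :
    List String × List String × Int :=
  let sent := PySem.Str.strip sent0
  let sent_len := PySem.Str.len sent + (if st.2.1 = [] then 0 else 1)
  if st.2.2 + sent_len ≤ m then
    (st.1, st.2.1 ++ [sent], st.2.2 + sent_len)
  else
    let packs := if st.2.1 = [] then st.1 else st.1 ++ [PySem.Str.join " " st.2.1]
    if PySem.Str.len sent ≤ m then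
      (packs, [sent], PySem.Str.len sent)
    else
      let pr := pvAWhile packs sent m
      if pr.2 ≠ "" then (pr.1, [pr.2], PySem.Str.len pr.2) else (pr.1, [], 0)

def pack_sentences (merged : List String) (max_len : Int) : List String :=
  let st := merged.foldl (pvAStep max_len) ([], [], 0)
  if st.2.1 ≠ [] then st.1 ++ [PySem.Str.join " " st.2.1] else st.1

-- ===== PORT B =====
-- B's 's[i:i+max_len] for i in range(0, len(s), max_len)'
def pvChunks (s : String) (m : Int) : List String :=
  (PySem.List.pyRange 0 (PySem.Str.len s) m).map
    (fun i => PySem.Str.slice s (some i) (some (i + m)))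

-- B's per-sentence normalization (phase 1 body)
def pvPieces (s : String) (m : Int) : List String :=
  if PySem.Str.len s ≤ m then [s] else pvChunks s m

-- one iteration of B's packing loop, on state (packs, cur : Option String)
def pvPackStep (m : Int) (st : List String × Option String) (p : String) :
    List String × Option String :=
  let cand := match st.2 with | none => p | some c => c ++ " " ++ p
  if PySem.Str.len cand ≤ m then (st.1, some cand)
  else ((match st.2 with | none => st.1 | some c => st.1 ++ [c]), some p)

def pack_sentences_alt (merged : List String) (max_len : Int) : List String :=
  let pieces := merged.foldl (fun acc raw => acc ++ pvPieces (PySem.Str.strip raw) max_len) []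
  let st := pieces.foldl (pvPackStep max_len) ([], none)
  match st.2 with | none => st.1 | some c => st.1 ++ [c]

-- ===== PRECONDITION & SPEC =====
-- Pre_ excludes exactly the inputs on which Python A never RETURNS: with max_len ≤ 0, as soon as
-- a stripped sentence must be split, the 'while len(sent) > max_len' loop runs forever (for
-- max_len < 0 even an empty sentence triggers it; for max_len = 0 any nonempty stripped one).
def Pre_pack_sentences (merged : List String) (max_len : Int) : Prop :=
  merged = [] ∨ 0 < max_len ∨ (max_len = 0 ∧ ∀ s ∈ merged, PySem.Str.strip s = "")
instance (merged : List String) (max_len : Int) : Decidable (Pre_pack_sentences merged max_len) := by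
  unfold Pre_pack_sentences; infer_instance

def pvWitness_pack_sentences : List String × Int := (["ab c ", " dd", "efghij", ""], 5)

def Spec_pack_sentences (merged : List String) (max_len : Int) (out : List String) : Prop := out = pack_sentences_alt merged max_len
instance (merged : List String) (max_len : Int) (out : List String) : Decidable (Spec_pack_sentences merged max_len out) := by unfold Spec_pack_sentences; infer_instance

-- ===== CLAIM (what is proved, stated in full; the proofs are below) =====
def Claim_equal_pack_sentences : Prop := ∀ (merged : List String) (max_len : Int), Dom_pack_sentences merged max_len → Pre_pack_sentences merged max_len → Spec_pack_sentences merged max_len (pack_sentences merged max_len)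

-- ===== LEMMAS AND PROOFS =====

theorem pvLenNonneg (s : String) : 0 ≤ PySem.Str.len s := by
  rw [PySem.Str.len_eq]; exact Int.natCast_nonneg _

-- " ".join of a one-element pack is that element
theorem pvJoinSingle (x : String) : PySem.Str.join " " [x] = x := by
  apply String.toList_inj.mp
  rw [PySem.Str.toList_join]
  simp [PySem.Chars.join_singleton]

-- joining one more sentence onto a nonempty pack appends ' ' and the sentence
theorem pvCharsJoinAppend (sep c : List Char) (l : List (List Char)) (h : l ≠ []) :
    PySem.Chars.join sep (l ++ [c]) = PySem.Chars.join sep l ++ sep ++ c := by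
  induction l with
  | nil => exact absurd rfl h
  | cons x rest ih =>
      cases rest with
      | nil => rw [List.cons_append, List.nil_append, PySem.Chars.join_cons_cons,
                   PySem.Chars.join_singleton, PySem.Chars.join_singleton]
      | cons y rest' =>
          rw [List.cons_append]
          show PySem.Chars.join sep (x :: y :: (rest' ++ [c]))
              = PySem.Chars.join sep (x :: y :: rest') ++ sep ++ c
          have ih' := ih (by simp)
          rw [List.cons_append] at ih'
          rw [PySem.Chars.join_cons_cons sep x y (rest' ++ [c]),
              ih', PySem.Chars.join_cons_cons]
          simp [List.append_assoc]

theorem pvJoinAppend (pk : List String) (h : pk ≠ []) (t : String) :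
    PySem.Str.join " " (pk ++ [t]) = PySem.Str.join " " pk ++ " " ++ t := by
  apply String.toList_inj.mp
  rw [String.toList_append, String.toList_append, PySem.Str.toList_join, PySem.Str.toList_join,
      List.map_append]
  exact pvCharsJoinAppend _ _ _ (by simpa using h)

theorem pvLenConcat (c p : String) :
    PySem.Str.len (c ++ " " ++ p) = PySem.Str.len c + 1 + PySem.Str.len p := by
  rw [PySem.Str.len_append, PySem.Str.len_append]
  norm_num [PySem.Str.len_eq]
  decide

-- the accumulator of pvAWhile only collects at the end
theorem pvAWhile_append (m : Int) (acc₂ : List String) (s : String) :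
    ∀ acc₁, pvAWhile (acc₁ ++ acc₂) s m = (acc₁ ++ (pvAWhile acc₂ s m).1, (pvAWhile acc₂ s m).2) := by
  induction acc₂, s using pvAWhile.induct m with
  | case1 acc s h ih =>
      intro acc₁
      rw [pvAWhile.eq_def, dif_pos h]
      conv_rhs => rw [pvAWhile.eq_def, dif_pos h]
      rw [List.append_assoc]
      exact ih acc₁
  | case2 acc s h =>
      intro acc₁
      rw [pvAWhile.eq_def, dif_neg h]
      conv_rhs => rw [pvAWhile.eq_def, dif_neg h]

theorem pvAWhile_nil (acc : List String) (s : String) (m : Int) :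
    pvAWhile acc s m = (acc ++ (pvAWhile [] s m).1, (pvAWhile [] s m).2) := by
  have := pvAWhile_append m [] s acc
  simpa using this

-- every collected prefix has length exactly m, and (for 0 < m) the remainder fits
theorem pvAWhile_lens (m : Int) (hm : 0 < m) (acc : List String) (s : String) :
    (∀ q ∈ acc, PySem.Str.len q = m) →
      (∀ q ∈ (pvAWhile acc s m).1, PySem.Str.len q = m) ∧ PySem.Str.len (pvAWhile acc s m).2 ≤ m := by
  induction acc, s using pvAWhile.induct m with
  | case1 acc s h ih =>
      intro hacc
      rw [pvAWhile.eq_def, dif_pos h]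
      apply ih
      intro q hq
      rcases List.mem_append.mp hq with hq | hq
      · exact hacc q hq
      · have hq' : q = PySem.Str.slice s none (some m) := by simpa using hq
        subst hq'
        rw [PySem.Str.len_eq, PySem.Str.toList_slice, PySem.Chars.slice_eq_listSlice,
            PySem.List.slice_to _ (le_of_lt h.2)]
        have := h.1
        rw [PySem.Str.len_eq] at this
        simp only [List.length_take]
        omega
  | case2 acc s h =>
      intro hacc
      rw [pvAWhile.eq_def, dif_neg h]
      refine ⟨hacc, ?_⟩
      show PySem.Str.len s ≤ m
      by_contra hlt
      exact h ⟨by omega, hm⟩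

theorem pvAWhile_ne_nil (s : String) (m : Int) (h : m < PySem.Str.len s ∧ 0 < m) :
    (pvAWhile [] s m).1 ≠ [] := by
  rw [pvAWhile.eq_def, dif_pos h]
  rw [pvAWhile_nil]
  simp

-- B's range-stride chunking unfolds one chunk at a time
theorem pvChunks_cons (s : String) (m : Int) (hm : 0 < m) (hL : 0 < PySem.Str.len s) :
    pvChunks s m = PySem.Str.slice s none (some m)
      :: pvChunks (PySem.Str.slice s (some m) none) m := by
  have hs' : (PySem.Str.slice s (some m) none).toList = s.toList.drop m.toNat := by
    rw [PySem.Str.toList_slice, PySem.Chars.slice_eq_listSlice,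
        PySem.List.slice_from _ hm.le]
  have hL' : PySem.Str.len (PySem.Str.slice s (some m) none)
      = ((s.toList.length - m.toNat : Nat) : Int) := by
    rw [PySem.Str.len_eq, hs']; simp
  have hLs : PySem.Str.len s = (s.toList.length : Int) := PySem.Str.len_eq s
  have hdiv : ∀ (x : Int), (x + m) / m = x / m + 1 := fun x => by
    have := Int.add_mul_ediv_right x 1 (ne_of_gt hm); simpa using this
  have hcount : ((PySem.Str.len s - 0 + m - 1) / m).toNat
      = (if (0:Int) < PySem.Str.len (PySem.Str.slice s (some m) none) then
          ((PySem.Str.len (PySem.Str.slice s (some m) none) - 0 + m - 1) / m).toNat else 0) + 1 := by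
    have e1 : PySem.Str.len s - 0 + m - 1 = (PySem.Str.len s - 1) + m := by ring
    have h2 := hdiv (PySem.Str.len s - 1)
    have h3 : 0 ≤ (PySem.Str.len s - 1) / m := Int.ediv_nonneg (by omega) hm.le
    by_cases hc : m < PySem.Str.len s
    · have hcpos : (0:Int) < PySem.Str.len (PySem.Str.slice s (some m) none) := by
        rw [hL']; omega
      rw [if_pos hcpos, e1]
      have e2 : PySem.Str.len (PySem.Str.slice s (some m) none) - 0 + m - 1
          = PySem.Str.len s - 1 := by rw [hL', hLs] at *; omega
      rw [e2]
      omega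
    · have hczero : ¬ (0:Int) < PySem.Str.len (PySem.Str.slice s (some m) none) := by
        rw [hL']; rw [hLs] at hc; omega
      rw [if_neg hczero, e1]
      have h4 : (PySem.Str.len s - 1) / m = 0 := Int.ediv_eq_zero_of_lt (by omega) (by omega)
      omega
  unfold pvChunks
  rw [PySem.List.pyRange_of_pos 0 (PySem.Str.len s) hm,
      PySem.List.pyRange_of_pos 0 (PySem.Str.len (PySem.Str.slice s (some m) none)) hm,
      if_pos hL, hcount, List.range_succ_eq_map]
  rw [List.map_cons, List.map_cons, List.map_map, List.map_map, List.map_map]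
  rw [List.cons_eq_cons]
  refine ⟨?_, ?_⟩
  · apply String.toList_inj.mp
    simp only [Nat.cast_zero, mul_zero, add_zero, zero_add, PySem.Str.toList_slice,
      PySem.Chars.slice_eq_listSlice]
    rw [PySem.List.slice_zero_start]
  · by_cases hc : (0:Int) < PySem.Str.len (PySem.Str.slice s (some m) none)
    · rw [if_pos hc]
      apply List.map_congr_left
      intro k _
      apply String.toList_inj.mp
      simp only [Function.comp_apply, Nat.succ_eq_add_one, zero_add,
        PySem.Str.toList_slice, PySem.Chars.slice_eq_listSlice, hs']
      have h0 : (0:Int) ≤ m * (k : Int) := mul_nonneg hm.le (Int.natCast_nonneg k)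
      have e : m * ((k:Int) + 1) = m * k + m := by ring
      rw [PySem.List.slice_toNat _ (by push_cast; omega) (by push_cast; omega),
          PySem.List.slice_toNat _ (by omega) (by omega), List.drop_drop]
      push_cast
      rw [e]
      have e3 : (m * (k:Int) + m).toNat = m.toNat + (m * (k:Int)).toNat := by omega
      have e4 : (m * (k:Int) + m + m).toNat - (m * (k:Int) + m).toNat
          = (m * (k:Int) + m).toNat - (m * (k:Int)).toNat := by omega
      rw [e4, e3]
    · rw [if_neg hc]
      simp

-- B's chunk list is A's while-loop prefixes plus its nonempty remainder
theorem pvChunks_nil (s : String) (hs : s.toList = []) (m : Int) (hm : 0 < m) :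
    pvChunks s m = [] := by
  unfold pvChunks
  have : PySem.Str.len s = 0 := by rw [PySem.Str.len_eq, hs]; rfl
  rw [this, PySem.List.pyRange_of_pos 0 0 hm]
  simp

theorem pvChunksSpecAux (m : Int) (hm : 0 < m) :
    ∀ (n : Nat) (s : String), s.toList.length ≤ n →
    pvChunks s m = (pvAWhile [] s m).1
      ++ (if (pvAWhile [] s m).2 ≠ "" then [(pvAWhile [] s m).2] else []) := by
  intro n
  induction n with
  | zero =>
      intro s hs
      have hnil : s.toList = [] := List.eq_nil_of_length_eq_zero (by omega)
      have hs0 : s = "" := String.toList_inj.mp (by simp [hnil])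
      subst hs0
      rw [pvChunks_nil _ (by rfl) _ hm, pvAWhile.eq_def, dif_neg (by simp [PySem.Str.len_eq]; omega)]
      simp
  | succ n ih =>
      intro s hs
      have hLs : PySem.Str.len s = (s.toList.length : Int) := PySem.Str.len_eq s
      have hdrop : (PySem.Str.slice s (some m) none).toList = s.toList.drop m.toNat := by
        rw [PySem.Str.toList_slice, PySem.Chars.slice_eq_listSlice,
            PySem.List.slice_from _ hm.le]
      by_cases hgt : m < PySem.Str.len s
      · rw [pvChunks_cons s m hm (by omega), pvAWhile.eq_def, dif_pos ⟨hgt, hm⟩,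
            pvAWhile_nil]
        have hlen' : (PySem.Str.slice s (some m) none).toList.length ≤ n := by
          rw [hdrop]; simp only [List.length_drop]; omega
        rw [ih _ hlen']
        simp
      · rw [pvAWhile.eq_def, dif_neg (by intro hh; exact hgt hh.1)]
        by_cases hs0 : s = ""
        · subst hs0
          rw [pvChunks_nil _ (by rfl) _ hm]
          simp
        · have hpos : 0 < PySem.Str.len s := by
            rw [hLs]
            have : s.toList ≠ [] := fun hh => hs0 (String.toList_inj.mp (by simp [hh]))
            have := List.length_pos_of_ne_nil this
            omega
          rw [pvChunks_cons s m hm hpos]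
          have hnil' : (PySem.Str.slice s (some m) none).toList = [] := by
            rw [hdrop]
            apply List.drop_eq_nil_of_le
            rw [hLs] at hgt
            omega
          rw [pvChunks_nil _ hnil' _ hm]
          have hhead : PySem.Str.slice s none (some m) = s := by
            apply String.toList_inj.mp
            rw [PySem.Str.toList_slice, PySem.Chars.slice_eq_listSlice,
                PySem.List.slice_to _ hm.le]
            apply List.take_of_length_le
            rw [hLs] at hgt
            omega
          rw [hhead]
          simp [hs0]

theorem pvChunksSpec (m : Int) (hm : 0 < m) (s : String) :
    pvChunks s m = (pvAWhile [] s m).1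
      ++ (if (pvAWhile [] s m).2 ≠ "" then [(pvAWhile [] s m).2] else []) :=
  pvChunksSpecAux m hm s.toList.length s (le_refl _)

-- relation between A's state (packs, pack, pack_len) and B's state (packs, cur):
-- either cur is the join of A's open pack (and pack_len its length), or A has already
-- flushed a full-width piece x that B still holds as its (inert) open chunk
def pvRel (m : Int) (a : List String × List String × Int) (b : List String × Option String) : Prop :=
  (b.1 = a.1 ∧
    ((a.2.1 = [] ∧ a.2.2 = 0 ∧ b.2 = none) ∨
     (a.2.1 ≠ [] ∧ b.2 = some (PySem.Str.join " " a.2.1) ∧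
       a.2.2 = PySem.Str.len (PySem.Str.join " " a.2.1)))) ∨
  (a.2.1 = [] ∧ a.2.2 = 0 ∧
    ∃ x, b.2 = some x ∧ PySem.Str.len x = m ∧ a.1 = b.1 ++ [x])

def pvFlushA (st : List String × List String × Int) : List String :=
  if st.2.1 = [] then st.1 else st.1 ++ [PySem.Str.join " " st.2.1]

def pvFlushB (st : List String × Option String) : List String :=
  match st.2 with | none => st.1 | some c => st.1 ++ [c]

theorem pvRel_flush (m : Int) (a : List String × List String × Int)
    (b : List String × Option String) (h : pvRel m a b) : pvFlushA a = pvFlushB b := by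
  rcases h with ⟨h1, ⟨h2, _, h4⟩ | ⟨h2, h3, _⟩⟩ | ⟨h1, _, x, h3, _, h5⟩
  · simp [pvFlushA, pvFlushB, h1, h2, h4]
  · simp [pvFlushA, pvFlushB, h1, h2, h3]
  · simp [pvFlushA, pvFlushB, h1, h3, h5]

-- B's packer step on a full-width chunk always flushes the open chunk and holds the piece
theorem pvStepFull (m : Int) (st : List String × Option String) (q : String)
    (hq : PySem.Str.len q = m) : pvPackStep m st q = (pvFlushB st, some q) := by
  obtain ⟨B, cur⟩ := st
  cases cur with
  | none =>
      simp only [pvPackStep, pvFlushB]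
      rw [if_pos (le_of_eq hq)]
  | some c =>
      have hc0 := pvLenNonneg c
      have hcand : PySem.Str.len (c ++ " " ++ q) = PySem.Str.len c + 1 + m := by
        rw [pvLenConcat, hq]
      simp only [pvPackStep, pvFlushB, hcand]
      rw [if_neg (by omega)]

-- folding B's packer over a run of full-width chunks: flush each previous chunk, hold the last
theorem pvFoldFull (m : Int) :
    ∀ (Qs : List String) (P : List String) (q : String),
      (∀ p ∈ Qs, PySem.Str.len p = m) → PySem.Str.len q = m →
      List.foldl (pvPackStep m) (P, some q) Qs =
        (P ++ (q :: Qs).dropLast, some ((q :: Qs).getLast (List.cons_ne_nil q Qs))) := by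
  intro Qs
  induction Qs with
  | nil => intro P q _ _; simp
  | cons q' Qs ih =>
      intro P q hQ hq
      rw [List.foldl_cons, pvStepFull m _ q' (hQ q' (by simp))]
      have : pvFlushB (P, some q) = P ++ [q] := rfl
      rw [this, ih (P ++ [q]) q' (fun p hp => hQ p (by simp [hp])) (hQ q' (by simp))]
      simp [List.getLast_cons]

-- one sentence of A simulated by B's fold over that sentence's pieces
theorem pvStepSim (m : Int) (s : String) (a : List String × List String × Int)
    (b : List String × Option String) (hR : pvRel m a b)
    (hc : 0 < m ∨ (m = 0 ∧ PySem.Str.strip s = "")) :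
    pvRel m (pvAStep m a s) (List.foldl (pvPackStep m) b (pvPieces (PySem.Str.strip s) m)) := by
  obtain ⟨P, pk, pl⟩ := a
  obtain ⟨B, cur⟩ := b
  have hlt0 := pvLenNonneg (PySem.Str.strip s)
  by_cases hsmall : PySem.Str.len (PySem.Str.strip s) ≤ m
  · -- the sentence fits in one piece; one step of B's packer
    rw [pvPieces, if_pos hsmall, List.foldl_cons, List.foldl_nil]
    have hAempty : ∀ P : List String, pvAStep m (P, [], 0) s
        = (P, [PySem.Str.strip s], PySem.Str.len (PySem.Str.strip s)) := by
      intro P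
      simp only [pvAStep, ite_true]
      rw [if_pos (show (0:Int) + (PySem.Str.len (PySem.Str.strip s) + 0) ≤ m by omega)]
      simp
    rcases hR with ⟨hb1, ⟨hpk, hpl, hcur⟩ | ⟨hpk, hcur, hpl⟩⟩ | ⟨hpk, hpl, x, hcur, hx, hP⟩
    · -- empty open pack, cur = none
      simp only at hb1 hpk hpl hcur
      subst hb1 hpk hpl hcur
      have hB : pvPackStep m (B, none) (PySem.Str.strip s) = (B, some (PySem.Str.strip s)) := by
        simp only [pvPackStep]
        rw [if_pos hsmall]
      rw [hAempty, hB]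
      exact Or.inl ⟨rfl, Or.inr ⟨by simp, by rw [pvJoinSingle], by simp [pvJoinSingle]⟩⟩
    · -- nonempty open pack, cur = its join
      simp only at hb1 hpk hcur hpl
      subst hcur
      rw [show B = P from hb1]
      have hcand : PySem.Str.len (PySem.Str.join " " pk ++ " " ++ PySem.Str.strip s)
          = pl + 1 + PySem.Str.len (PySem.Str.strip s) := by rw [pvLenConcat, ← hpl]
      by_cases hfit : pl + (PySem.Str.len (PySem.Str.strip s) + 1) ≤ m
      · have hA : pvAStep m (P, pk, pl) s
            = (P, pk ++ [PySem.Str.strip s], pl + (PySem.Str.len (PySem.Str.strip s) + 1)) := by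
          simp only [pvAStep]
          rw [if_neg hpk, if_pos hfit]
        have hB : pvPackStep m (P, some (PySem.Str.join " " pk)) (PySem.Str.strip s)
            = (P, some (PySem.Str.join " " pk ++ " " ++ PySem.Str.strip s)) := by
          simp only [pvPackStep]
          rw [hcand, if_pos (by omega)]
        rw [hA, hB]
        refine Or.inl ⟨rfl, Or.inr ⟨by simp, ?_, ?_⟩⟩
        · simp only
          rw [pvJoinAppend pk hpk]
        · simp only
          rw [pvJoinAppend pk hpk, pvLenConcat, ← hpl]
          omega
      · have hA : pvAStep m (P, pk, pl) s
            = (P ++ [PySem.Str.join " " pk], [PySem.Str.strip s],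
                PySem.Str.len (PySem.Str.strip s)) := by
          simp only [pvAStep]
          rw [if_neg hpk, if_neg hfit, if_neg hpk, if_pos hsmall]
        have hB : pvPackStep m (P, some (PySem.Str.join " " pk)) (PySem.Str.strip s)
            = (P ++ [PySem.Str.join " " pk], some (PySem.Str.strip s)) := by
          simp only [pvPackStep]
          rw [hcand, if_neg (by omega)]
        rw [hA, hB]
        exact Or.inl ⟨rfl, Or.inr ⟨by simp, by rw [pvJoinSingle], by simp [pvJoinSingle]⟩⟩
    · -- inert full-width chunk x still open on B's side
      simp only at hpk hpl hcur hx hP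
      subst hpk hpl hcur hP
      have hcand : PySem.Str.len (x ++ " " ++ PySem.Str.strip s)
          = m + 1 + PySem.Str.len (PySem.Str.strip s) := by rw [pvLenConcat, hx]
      have hB : pvPackStep m (B, some x) (PySem.Str.strip s)
          = (B ++ [x], some (PySem.Str.strip s)) := by
        simp only [pvPackStep]
        rw [hcand, if_neg (by omega)]
      rw [hAempty, hB]
      exact Or.inl ⟨rfl, Or.inr ⟨by simp, by rw [pvJoinSingle], by simp [pvJoinSingle]⟩⟩
  · -- oversize sentence: split into full-width chunks plus remainder
    have hm : 0 < m := by
      rcases hc with hm | ⟨hm0, hstrip⟩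
      · exact hm
      · exfalso; apply hsmall; rw [hstrip, hm0]; simp [PySem.Str.len_eq]
    have hgt : m < PySem.Str.len (PySem.Str.strip s) := by omega
    have hlens := pvAWhile_lens m hm [] (PySem.Str.strip s) (by simp)
    have hne : (pvAWhile [] (PySem.Str.strip s) m).1 ≠ [] :=
      pvAWhile_ne_nil (PySem.Str.strip s) m ⟨hgt, hm⟩
    obtain ⟨q₀, Qrest, hQ⟩ := List.exists_cons_of_ne_nil hne
    have hpl0 : 0 ≤ pl := by
      rcases hR with ⟨_, ⟨_, hpl, _⟩ | ⟨_, _, hpl⟩⟩ | ⟨_, hpl, _⟩ <;>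
        simp only at hpl <;> rw [hpl] <;> first | rfl | exact pvLenNonneg _
    -- A's step flushes, then runs its while loop
    have hA : pvAStep m (P, pk, pl) s =
        (if (pvAWhile [] (PySem.Str.strip s) m).2 ≠ "" then
          (pvFlushA (P, pk, pl) ++ (pvAWhile [] (PySem.Str.strip s) m).1,
            [(pvAWhile [] (PySem.Str.strip s) m).2],
            PySem.Str.len (pvAWhile [] (PySem.Str.strip s) m).2)
        else (pvFlushA (P, pk, pl) ++ (pvAWhile [] (PySem.Str.strip s) m).1, [], 0)) := by
      simp only [pvAStep, pvFlushA]
      rw [if_neg (by split_ifs <;> omega), if_neg hsmall, pvAWhile_nil]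
    -- B folds over the chunk list
    have hq0len : PySem.Str.len q₀ = m := hlens.1 q₀ (by rw [hQ]; simp)
    have hQlens : ∀ p ∈ Qrest, PySem.Str.len p = m := fun p hp => hlens.1 p (by rw [hQ]; simp [hp])
    have hlast : PySem.Str.len ((q₀ :: Qrest).getLast (List.cons_ne_nil q₀ Qrest)) = m := by
      apply hlens.1
      rw [hQ]
      exact List.getLast_mem _
    have hflushB : pvFlushB (B, cur) = pvFlushA (P, pk, pl) :=
      (pvRel_flush m _ _ hR).symm
    have hfold : List.foldl (pvPackStep m) (B, cur) (pvAWhile [] (PySem.Str.strip s) m).1 =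
        (pvFlushA (P, pk, pl) ++ (q₀ :: Qrest).dropLast,
          some ((q₀ :: Qrest).getLast (List.cons_ne_nil q₀ Qrest))) := by
      rw [hQ, List.foldl_cons, pvStepFull m _ q₀ hq0len, hflushB,
          pvFoldFull m Qrest _ q₀ hQlens hq0len]
    have hdl : pvFlushA (P, pk, pl) ++ (q₀ :: Qrest).dropLast
          ++ [(q₀ :: Qrest).getLast (List.cons_ne_nil q₀ Qrest)]
        = pvFlushA (P, pk, pl) ++ (pvAWhile [] (PySem.Str.strip s) m).1 := by
      rw [List.append_assoc, List.dropLast_append_getLast, hQ]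
    rw [pvPieces, if_neg hsmall, pvChunksSpec m hm]
    by_cases hr : (pvAWhile [] (PySem.Str.strip s) m).2 ≠ ""
    · -- nonempty remainder: it becomes the fresh open pack / chunk on both sides
      rw [if_pos hr, List.foldl_append, hfold, List.foldl_cons, List.foldl_nil]
      have hrlen := hlens.2
      have hrlen0 := pvLenNonneg (pvAWhile [] (PySem.Str.strip s) m).2
      have hcand : PySem.Str.len ((q₀ :: Qrest).getLast (List.cons_ne_nil q₀ Qrest)
            ++ " " ++ (pvAWhile [] (PySem.Str.strip s) m).2)
          = m + 1 + PySem.Str.len (pvAWhile [] (PySem.Str.strip s) m).2 := by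
        rw [pvLenConcat, hlast]
      simp only [pvPackStep, hcand]
      rw [if_neg (by omega), hA, if_pos hr]
      refine Or.inl ⟨by simpa using hdl, Or.inr ⟨by simp, by simp [pvJoinSingle],
        by simp [pvJoinSingle]⟩⟩
    · -- empty remainder: A closes the pack, B keeps the last full-width chunk open
      rw [if_neg hr, List.append_nil, hfold, hA, if_neg hr]
      exact Or.inr ⟨rfl, rfl, (q₀ :: Qrest).getLast (List.cons_ne_nil q₀ Qrest),
        rfl, hlast, hdl.symm⟩

theorem pvFoldSim (m : Int) (l : List String) :
    ∀ a b, pvRel m a b → (∀ s ∈ l, 0 < m ∨ (m = 0 ∧ PySem.Str.strip s = "")) →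
      pvRel m (List.foldl (pvAStep m) a l)
        (List.foldl (pvPackStep m) b (l.flatMap (fun s => pvPieces (PySem.Str.strip s) m))) := by
  induction l with
  | nil => intro a b hR _; exact hR
  | cons s l ih =>
      intro a b hR hc
      rw [List.flatMap_cons, List.foldl_append, List.foldl_cons]
      exact ih _ _ (pvStepSim m s a b hR (hc s (by simp))) (fun t ht => hc t (by simp [ht]))

-- ===== VERDICT (by name: the statement is the Claim_ definition above) =====
theorem pack_sentences_spec : Claim_equal_pack_sentences := by
  intro merged m _ hpre
  unfold Spec_pack_sentences pack_sentences pack_sentences_alt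
  have hc : ∀ s ∈ merged, 0 < m ∨ (m = 0 ∧ PySem.Str.strip s = "") := by
    rcases hpre with rfl | hm | ⟨hm, hall⟩
    · intro s hs; simp at hs
    · intro s _; exact Or.inl hm
    · intro s hs; exact Or.inr ⟨hm, hall s hs⟩
  rw [PySem.List.foldl_append_eq_flatMap (g := fun raw => pvPieces (PySem.Str.strip raw) m)]
  have hrel := pvFoldSim m merged ([], [], 0) ([], none) (Or.inl ⟨rfl, Or.inl ⟨rfl, rfl, rfl⟩⟩) hc
  have hflush := pvRel_flush m _ _ hrel
  simp only [pvFlushA, pvFlushB] at hflush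
  simp only [List.nil_append]
  split_ifs at hflush ⊢ <;> simp_all
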